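-- pv_equiv track=rewrite | github.com/verilog-to-routing/vtr-verilog-to-routing | vtr_flow/scripts/python_libs/verilogtorouting/flow.py | check_abc_lec_status
-- ===== SOURCE A (Python) =====
-- def check_abc_lec_status(output):
--     equivalent = None
--     for line in output:
--         if line.startswith("Networks are NOT EQUIVALENT"):
--             equivalent = False
--         elif line.startswith("Networks are equivalent"):
--             equivalent = True
--
--     #Returns None if could not determine LEC status
--     return equivalent
-- ===== SOURCE B (Python) =====
-- def check_abc_lec_status(output):
--     lines = list(output)
--     for line in reversed(lines):
--         if line.startswith("Networks are NOT EQUIVALENT"):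
--             return False
--         if line.startswith("Networks are equivalent"):
--             return True
--     return None
-- ===== Notes on version B (the rewrite author's own statement) =====
-- stated objective: alternative
-- what changed: Replaces the forward full-scan with a last-write-wins accumulator by a reversed-order scan that returns on the first matching line (early exit).
import Mathlib
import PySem

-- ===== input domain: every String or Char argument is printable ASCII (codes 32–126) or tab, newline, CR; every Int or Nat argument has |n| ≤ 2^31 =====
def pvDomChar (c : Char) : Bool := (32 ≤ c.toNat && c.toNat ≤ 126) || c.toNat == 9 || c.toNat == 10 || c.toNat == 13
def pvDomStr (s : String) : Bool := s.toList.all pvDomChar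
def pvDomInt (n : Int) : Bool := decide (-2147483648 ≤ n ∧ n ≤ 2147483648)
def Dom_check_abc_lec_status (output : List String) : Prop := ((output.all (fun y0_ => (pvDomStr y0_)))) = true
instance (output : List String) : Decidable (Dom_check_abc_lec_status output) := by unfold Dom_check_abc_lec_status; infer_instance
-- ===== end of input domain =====

-- B changes the decomposition: a reversed-order scan returning at the first matching
-- line replaces A's forward full scan with a last-write-wins accumulator (objective: alternative).

-- ===== PORT A =====
def check_abc_lec_status (output : List String) : Option Bool :=
  output.foldl
    (fun equivalent line =>
      if PySem.Str.startswith line "Networks are NOT EQUIVALENT" then some false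
      else if PySem.Str.startswith line "Networks are equivalent" then some true
      else equivalent)
    none

-- ===== PORT B =====
-- scan from the end, return on first matching line
def pvAltScan (lines : List String) : Option Bool :=
  match lines with
  | [] => none
  | line :: rest =>
      if PySem.Str.startswith line "Networks are NOT EQUIVALENT" then some false
      else if PySem.Str.startswith line "Networks are equivalent" then some true
      else pvAltScan rest

def check_abc_lec_status_alt (output : List String) : Option Bool :=
  pvAltScan output.reverse

-- ===== PRECONDITION & SPEC =====
def Spec_check_abc_lec_status (output : List String) (out : Option Bool) : Prop := out = check_abc_lec_status_alt output
instance (output : List String) (out : Option Bool) : Decidable (Spec_check_abc_lec_status output out) := by unfold Spec_check_abc_lec_status; infer_instance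

-- ===== CLAIM (what is proved, stated in full; the proofs are below) =====
def Claim_equal_check_abc_lec_status : Prop := ∀ (output : List String), Dom_check_abc_lec_status output → Spec_check_abc_lec_status output (check_abc_lec_status output)

-- ===== LEMMAS AND PROOFS =====

-- the per-line verdict, used only in the proofs
def pvStep (line : String) : Option Bool :=
  if PySem.Str.startswith line "Networks are NOT EQUIVALENT" then some false
  else if PySem.Str.startswith line "Networks are equivalent" then some true
  else none

lemma pvAltScan_append_singleton (ys : List String) (x : String) :
    pvAltScan (ys ++ [x]) = ((pvAltScan ys).or (pvStep x)) := by
  induction ys with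
  | nil => simp [pvAltScan, pvStep]; split_ifs <;> simp
  | cons y ys ih =>
      simp only [List.cons_append, pvAltScan, ih]
      split_ifs <;> simp

lemma foldl_eq_scan (xs : List String) (acc : Option Bool) :
    xs.foldl
      (fun equivalent line =>
        if PySem.Str.startswith line "Networks are NOT EQUIVALENT" then some false
        else if PySem.Str.startswith line "Networks are equivalent" then some true
        else equivalent)
      acc = (pvAltScan xs.reverse).or acc := by
  induction xs generalizing acc with
  | nil => simp [pvAltScan]
  | cons x xs ih =>
      simp only [List.foldl_cons, ih, List.reverse_cons, pvAltScan_append_singleton,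
        Option.or_assoc]
      congr 1
      simp [pvStep]
      split_ifs <;> simp

-- ===== VERDICT (by name: the statement is the Claim_ definition above) =====
theorem check_abc_lec_status_spec : Claim_equal_check_abc_lec_status := by
  intro output _
  unfold Spec_check_abc_lec_status check_abc_lec_status check_abc_lec_status_alt
  rw [foldl_eq_scan]
  simp
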